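-- pv_equiv track=rewrite | github.com/syzhang/aoc | aoc_23/day11.py | duplicate_rows_cols
-- ===== SOURCE A (Python) =====
-- def duplicate_rows_cols(matrix, rows_to_duplicate, cols_to_duplicate):
--     new_matrix = []
--     for i, row in enumerate(matrix):
--         new_row = []
--         for j, val in enumerate(row):
--             # Duplicate the column if necessary
--             new_row.extend([val] * (cols_to_duplicate.count(j) + 1))
--         # Duplicate the row if necessary
--         new_matrix.extend([new_row] * (rows_to_duplicate.count(i) + 1))
--     return new_matrix
-- ===== SOURCE B (Python) =====
-- def duplicate_rows_cols(matrix, rows_to_duplicate, cols_to_duplicate):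
--     # Sort each duplication list once, then expand with a two-pointer merge scan:
--     # walk the items in index order while consuming the sorted duplicate list,
--     # appending one extra copy (the same reference) per consumed match.
--     def dup_merge(items, sorted_dups):
--         out = []
--         k = 0
--         for j, x in enumerate(items):
--             while k < len(sorted_dups) and sorted_dups[k] < j:
--                 k += 1
--             out.append(x)
--             while k < len(sorted_dups) and sorted_dups[k] == j:
--                 out.append(x)
--                 k += 1
--         return out
--
--     cs = sorted(cols_to_duplicate)
--     rs = sorted(rows_to_duplicate)
--     return dup_merge([dup_merge(row, cs) for row in matrix], rs)
-- ===== Notes on version B (the rewrite author's own statement) =====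
-- stated objective: faster
-- what changed: B sorts each duplication list once and expands via a two-pointer merge scan (consuming the sorted list while walking indices), in two staged passes (columns per row, then rows), instead of A's interleaved per-cell list.count scans.
import Mathlib
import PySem

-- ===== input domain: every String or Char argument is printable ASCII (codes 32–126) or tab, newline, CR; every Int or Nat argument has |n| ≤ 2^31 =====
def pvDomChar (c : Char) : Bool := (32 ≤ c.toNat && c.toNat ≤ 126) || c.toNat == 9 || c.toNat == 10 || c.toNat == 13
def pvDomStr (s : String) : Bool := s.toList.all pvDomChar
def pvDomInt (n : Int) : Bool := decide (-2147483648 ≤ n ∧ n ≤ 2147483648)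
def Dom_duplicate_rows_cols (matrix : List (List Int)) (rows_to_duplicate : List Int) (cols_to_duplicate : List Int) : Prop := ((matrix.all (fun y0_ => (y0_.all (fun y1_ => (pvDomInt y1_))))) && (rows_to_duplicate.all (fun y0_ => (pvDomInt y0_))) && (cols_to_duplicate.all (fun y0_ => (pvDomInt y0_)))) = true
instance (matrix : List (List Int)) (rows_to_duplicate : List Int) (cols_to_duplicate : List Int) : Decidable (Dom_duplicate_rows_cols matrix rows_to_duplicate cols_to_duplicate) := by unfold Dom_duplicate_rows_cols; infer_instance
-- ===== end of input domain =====

-- ===== PORT A =====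
-- B sorts each duplication list once and expands by a two-pointer merge scan
-- in two staged passes, instead of A's per-cell list.count scans; same return value.
def duplicate_rows_cols (matrix : List (List Int)) (rows_to_duplicate : List Int) (cols_to_duplicate : List Int) : List (List Int) :=
  (PySem.List.enumerate matrix).foldl (fun new_matrix p =>
    let new_row := (PySem.List.enumerate p.2).foldl (fun new_row q =>
      new_row ++ List.replicate (PySem.List.count cols_to_duplicate q.1 + 1) q.2) []
    new_matrix ++ List.replicate (PySem.List.count rows_to_duplicate p.1 + 1) new_row) []

-- ===== PORT B =====
-- 'while k < len(sorted_dups) and sorted_dups[k] < j: k += 1'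
def pvSkipLt (ds : List Int) (j : Int) (k : Nat) : Nat :=
  if h : k < ds.length then
    if ds[k] < j then pvSkipLt ds j (k + 1) else k
  else k
termination_by ds.length - k

-- 'while k < len(sorted_dups) and sorted_dups[k] == j: out.append(x); k += 1'
def pvTakeEq {α : Type} (ds : List Int) (j : Int) (x : α) (out : List α) (k : Nat) : List α × Nat :=
  if h : k < ds.length then
    if ds[k] = j then pvTakeEq ds j x (out ++ [x]) (k + 1) else (out, k)
  else (out, k)
termination_by ds.length - k

-- 'def dup_merge(items, sorted_dups): …' — the for-loop over enumerate(items) with state (out, k)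
def pvDupMerge {α : Type} (items : List α) (sorted_dups : List Int) : List α :=
  ((PySem.List.enumerate items).foldl (fun s q =>
      pvTakeEq sorted_dups q.1 q.2 (s.1 ++ [q.2]) (pvSkipLt sorted_dups q.1 s.2))
    ([], 0)).1

def duplicate_rows_cols_alt (matrix : List (List Int)) (rows_to_duplicate : List Int) (cols_to_duplicate : List Int) : List (List Int) :=
  let cs := PySem.List.sorted cols_to_duplicate (fun x => x) false
  let rs := PySem.List.sorted rows_to_duplicate (fun x => x) false
  pvDupMerge (matrix.map (fun row => pvDupMerge row cs)) rs

-- ===== PRECONDITION & SPEC =====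
def Spec_duplicate_rows_cols (matrix : List (List Int)) (rows_to_duplicate : List Int) (cols_to_duplicate : List Int) (out : List (List Int)) : Prop := out = duplicate_rows_cols_alt matrix rows_to_duplicate cols_to_duplicate
instance (matrix : List (List Int)) (rows_to_duplicate : List Int) (cols_to_duplicate : List Int) (out : List (List Int)) : Decidable (Spec_duplicate_rows_cols matrix rows_to_duplicate cols_to_duplicate out) := by unfold Spec_duplicate_rows_cols; infer_instance

-- ===== CLAIM (what is proved, stated in full; the proofs are below) =====
def Claim_equal_duplicate_rows_cols : Prop := ∀ (matrix : List (List Int)) (rows_to_duplicate : List Int) (cols_to_duplicate : List Int), Dom_duplicate_rows_cols matrix rows_to_duplicate cols_to_duplicate → Spec_duplicate_rows_cols matrix rows_to_duplicate cols_to_duplicate (duplicate_rows_cols matrix rows_to_duplicate cols_to_duplicate)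

-- ===== LEMMAS AND PROOFS =====

-- number of elements < j, the pointer's resting place in a sorted list
def pvLt (ds : List Int) (j : Int) : Nat := ds.countP (fun x => decide (x < j))

theorem pvLt_takeWhile (ds : List Int) (j : Int) (hs : ds.Pairwise (· ≤ ·)) :
    ds.takeWhile (fun x => decide (x < j)) = ds.filter (fun x => decide (x < j)) := by
  induction ds with
  | nil => rfl
  | cons a t ih =>
    rcases List.pairwise_cons.mp hs with ⟨ha, ht⟩
    by_cases h : a < j
    · simp [h, ih ht]
    · have : t.filter (fun x => decide (x < j)) = [] := by
        refine List.filter_eq_nil_iff.mpr (fun x hx => by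
          simp only [decide_eq_true_eq]
          exact fun hlt => h (lt_of_le_of_lt (ha x hx) hlt))
      simp [h, this]

theorem pvDrop_length_takeWhile {α : Type} (p : α → Bool) (l : List α) :
    l.drop (l.takeWhile p).length = l.dropWhile p := by
  induction l with
  | nil => rfl
  | cons a t ih =>
    by_cases h : p a
    · rw [List.takeWhile_cons_of_pos h, List.dropWhile_cons_of_pos h, List.length_cons,
        List.drop_succ_cons, ih]
    · rw [List.takeWhile_cons_of_neg h, List.dropWhile_cons_of_neg h, List.length_nil,
        List.drop_zero]

theorem pvLt_eq_length_takeWhile (ds : List Int) (j : Int) (hs : ds.Pairwise (· ≤ ·)) :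
    pvLt ds j = (ds.takeWhile (fun x => decide (x < j))).length := by
  rw [pvLt_takeWhile ds j hs]; simp [pvLt, List.countP_eq_length_filter]

theorem pvDrop_not_lt (ds : List Int) (j : Int) (hs : ds.Pairwise (· ≤ ·)) :
    ∀ x ∈ ds.drop (pvLt ds j), ¬ x < j := by
  rw [pvLt_eq_length_takeWhile ds j hs, pvDrop_length_takeWhile]
  induction ds with
  | nil => simp
  | cons a t ih =>
    rcases List.pairwise_cons.mp hs with ⟨ha, ht⟩
    intro x hx
    by_cases h : a < j
    · rw [List.dropWhile_cons_of_pos (by simpa using h)] at hx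
      exact ih ht x hx
    · rw [List.dropWhile_cons_of_neg (by simpa using h)] at hx
      rcases List.mem_cons.mp hx with rfl | hxt
      · exact h
      · exact fun hlt => h (lt_of_le_of_lt (ha x hxt) hlt)

theorem pvSkipLt_eq (ds : List Int) (j : Int) (hs : ds.Pairwise (· ≤ ·)) :
    ∀ k, k ≤ pvLt ds j → pvSkipLt ds j k = pvLt ds j := by
  intro k hk
  fun_induction pvSkipLt ds j k with
  | case1 k h hlt ih =>
    refine ih (by
      rcases Nat.lt_or_ge k (pvLt ds j) with h1 | h1
      · omega
      · exfalso
        have hmem : ds[k] ∈ ds.drop (pvLt ds j) := by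
          have : ds[k] = (ds.drop (pvLt ds j))[k - pvLt ds j]'(by
            rw [List.length_drop]; omega) := by
            rw [List.getElem_drop]; congr 1; omega
          rw [this]; exact List.getElem_mem _
        exact pvDrop_not_lt ds j hs _ hmem hlt)
  | case2 k h hlt =>
    rcases Nat.lt_or_ge k (pvLt ds j) with h1 | h1
    · exfalso
      have hk' : k < (ds.takeWhile (fun x => decide (x < j))).length := by
        rw [← pvLt_eq_length_takeWhile ds j hs]; omega
      have hget := (List.takeWhile_prefix (l := ds) (fun x => decide (x < j))).getElem hk'
      have hp := List.mem_takeWhile_imp (List.getElem_mem hk')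
      rw [hget] at hp
      exact hlt (by simpa using hp)
    · omega
  | case3 k h =>
    have := List.countP_le_length (p := fun x => decide (x < j)) (l := ds)
    simp only [pvLt] at *
    omega

theorem pvTakeEq_general {α : Type} (ds : List Int) (j : Int) (x : α) :
    ∀ (k : Nat) (out : List α),
    pvTakeEq ds j x out k =
      (out ++ List.replicate ((ds.drop k).takeWhile (fun a => a == j)).length x,
       k + ((ds.drop k).takeWhile (fun a => a == j)).length) := by
  intro k out
  fun_induction pvTakeEq ds j x out k with
  | case1 out k h heq ih =>
    have hd : ds.drop k = ds[k] :: ds.drop (k + 1) := List.drop_eq_getElem_cons h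
    rw [hd, List.takeWhile_cons_of_pos (by simpa using heq), List.length_cons, ih]
    exact Prod.ext (by simp [List.replicate_succ, List.append_assoc]) (by omega)
  | case2 out k h heq =>
    have hd : ds.drop k = ds[k] :: ds.drop (k + 1) := List.drop_eq_getElem_cons h
    rw [hd, List.takeWhile_cons_of_neg (by simpa using heq)]
    simp
  | case3 out k h =>
    have : ds.drop k = [] := List.drop_eq_nil_of_le (by omega)
    simp [this]

theorem takeWhile_eq_count (j : Int) :
    ∀ (l : List Int), l.Pairwise (· ≤ ·) → (∀ x ∈ l, ¬ x < j) →
    ((l.takeWhile (fun a => a == j)).length = l.count j) := by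
  intro l
  induction l with
  | nil => intros; rfl
  | cons a t ih =>
    intro hs hge
    rcases List.pairwise_cons.mp hs with ⟨ha, ht⟩
    by_cases h : a = j
    · subst h
      rw [List.takeWhile_cons_of_pos (by simp), List.count_cons_self]
      simp only [List.length_cons]
      rw [ih ht (fun x hx => hge x (List.mem_cons_of_mem _ hx))]
    · have haj : j < a := lt_of_le_of_ne (not_lt.mp (hge a (List.mem_cons_self))) (Ne.symm h)
      rw [List.takeWhile_cons_of_neg (by simpa using h)]
      have : (a :: t).count j = 0 := by
        refine List.count_eq_zero.mpr (fun hmem => ?_)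
        rcases List.mem_cons.mp hmem with rfl | hmem
        · exact h rfl
        · exact absurd (lt_of_lt_of_le haj (ha j hmem)) (lt_irrefl j)
      simp [this]

theorem pvTakeEq_eq {α : Type} (ds : List Int) (j : Int) (x : α) (out : List α)
    (hs : ds.Pairwise (· ≤ ·)) :
    pvTakeEq ds j x out (pvLt ds j) =
      (out ++ List.replicate (ds.count j) x, pvLt ds j + ds.count j) := by
  rw [pvTakeEq_general]
  have hsub : (ds.drop (pvLt ds j)).Pairwise (· ≤ ·) := hs.sublist (List.drop_sublist _ _)
  have hge := pvDrop_not_lt ds j hs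
  have hcnt : (ds.drop (pvLt ds j)).count j = ds.count j := by
    have hlen := pvLt_eq_length_takeWhile ds j hs
    conv_rhs => rw [← List.takeWhile_append_dropWhile (p := fun x => decide (x < j)) (l := ds)]
    rw [List.count_append]
    have h0 : (ds.takeWhile (fun x => decide (x < j))).count j = 0 := by
      refine List.count_eq_zero.mpr (fun hmem => ?_)
      rw [pvLt_takeWhile ds j hs] at hmem
      have := (List.mem_filter.mp hmem).2
      simp at this
    rw [h0, Nat.zero_add, hlen, pvDrop_length_takeWhile]
  rw [takeWhile_eq_count j _ hsub hge, hcnt]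

theorem pvLt_split (ds : List Int) (j : Int) :
    pvLt ds j + ds.count j = pvLt ds (j + 1) := by
  induction ds with
  | nil => rfl
  | cons a t ih =>
    simp only [pvLt, List.countP_cons, List.count_cons, beq_iff_eq,
      decide_eq_true_eq] at *
    split_ifs <;> omega

theorem pvMergeLoop_fst {α : Type} (cs : List Int) (hs : cs.Pairwise (· ≤ ·)) :
    ∀ (items : List α) (j0 : Int) (out : List α) (k : Nat), k ≤ pvLt cs j0 →
    ((PySem.List.enumerate items j0).foldl (fun s q =>
        pvTakeEq cs q.1 q.2 (s.1 ++ [q.2]) (pvSkipLt cs q.1 s.2)) (out, k)).1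
      = out ++ (PySem.List.enumerate items j0).flatMap
          (fun q => List.replicate (cs.count q.1 + 1) q.2) := by
  intro items
  induction items with
  | nil => intro j0 out k hk; simp [PySem.List.enumerate_nil]
  | cons x rest ih =>
    intro j0 out k hk
    rw [PySem.List.enumerate_cons]
    simp only [List.foldl_cons, List.flatMap_cons]
    rw [pvSkipLt_eq cs j0 hs k hk, pvTakeEq_eq cs j0 x (out ++ [x]) hs]
    rw [ih (j0 + 1) _ _ (by rw [pvLt_split])]
    simp [List.replicate_succ, List.append_assoc]

theorem pvCount_sorted (ds : List Int) (v : Int) :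
    (PySem.List.sorted ds (fun x => x) false).count v = ds.count v :=
  (PySem.List.sorted_perm ds (fun x => x) false).count_eq v

theorem pvDupMerge_eq {α : Type} [BEq α] [LawfulBEq α] (items : List α) (ds : List Int) :
    pvDupMerge items (PySem.List.sorted ds (fun x => x) false)
      = (PySem.List.enumerate items).foldl (fun acc q =>
          acc ++ List.replicate (PySem.List.count ds q.1 + 1) q.2) [] := by
  unfold pvDupMerge
  rw [pvMergeLoop_fst _ (PySem.List.sorted_pairwise ds (fun x => x)) items 0 [] 0 (Nat.zero_le _)]
  rw [PySem.List.foldl_append_eq_flatMap]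
  simp only [List.nil_append]
  refine List.flatMap_congr (fun q hq => ?_)
  rw [pvCount_sorted, PySem.List.count_eq]

theorem pvEnumerate_map {a b : Type} (f : a → b) (xs : List a) (s : Int) :
    PySem.List.enumerate (xs.map f) s
      = (PySem.List.enumerate xs s).map (fun p => (p.1, f p.2)) := by
  induction xs generalizing s with
  | nil => simp [PySem.List.enumerate_nil]
  | cons x xs ih => simp [PySem.List.enumerate_cons, ih]

theorem duplicate_rows_cols_eq (matrix : List (List Int)) (rows : List Int) (cols : List Int) :
    duplicate_rows_cols matrix rows cols = duplicate_rows_cols_alt matrix rows cols := by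
  unfold duplicate_rows_cols duplicate_rows_cols_alt
  rw [pvDupMerge_eq, pvEnumerate_map, PySem.List.foldl_append_eq_flatMap,
    PySem.List.foldl_append_eq_flatMap, List.flatMap_map]
  simp only [List.nil_append]
  refine List.flatMap_congr (fun p hp => ?_)
  rw [pvDupMerge_eq]

-- ===== VERDICT (by name: the statement is the Claim_ definition above) =====
theorem duplicate_rows_cols_spec : Claim_equal_duplicate_rows_cols := by
  intro matrix rows cols _
  exact duplicate_rows_cols_eq matrix rows cols
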